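-- pv_equiv track=rewrite | github.com/nishio/atcoder | abc173/e.py | solve
-- ===== SOURCE A (Python) =====
-- INF = 10 ** 9 + 1  # sys.maxsize # float("inf")
--
-- MOD = 10 ** 9 + 7
--
-- def solve(N, K, XS):
--     "void()"
--
--     posi = [x for x in XS if x >= 0]
--     nega = [x for x in XS if x < 0]
--
--     nega.sort(reverse=True)
--     posi.sort()
--
--     if K == N:
--         # no choice
--         ret = 1
--         for i in range(N):
--             ret *= XS[i]
--             ret %= MOD
--         return ret
--
--     if not posi and K % 2:
--         # negative answer
--         # find smallest abs
--         ret = 1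
--         for i in range(K):
--             ret *= nega[i]
--             ret %= MOD
--         return ret
--
--     ret = 1
--     while K:
--         # debug(": K, nega, posi", K, nega, posi)
--         if K >= 2:
--             if len(posi) >= 2:
--                 v = posi[-1] * posi[-2]
--                 if len(nega) >= 2:
--                     w = nega[-1] * nega[-2]
--                 else:
--                     w = -INF
--                 if v > w:
--                     posi.pop()
--                     posi.pop()
--                     ret *= v
--                     ret %= MOD
--                 else:
--                     nega.pop()
--                     nega.pop()
--                     ret *= w
--                     ret %= MOD
--
--             else:
--                 w = nega[-1] * nega[-2]
--                 nega.pop()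
--                 nega.pop()
--                 ret *= w
--                 ret %= MOD
--
--             K -= 2
--         else:
--             if posi:
--                 ret *= posi[-1]
--                 ret %= MOD
--             else:
--                 ret *= nega[0]
--                 ret %= MOD
--             K -= 1
--
--     return ret
-- ===== SOURCE B (Python) =====
-- MOD = 10 ** 9 + 7
--
-- def _prodmod(xs):
--     p = 1
--     for x in xs:
--         p = p * x % MOD
--     return p
--
-- def solve(N, K, XS):
--     if K == N:
--         # no choice: the whole prefix of length N is forced
--         return _prodmod(XS[:N])
--     pos = sorted([x for x in XS if x >= 0], reverse=True)   # descending
--     neg = sorted([x for x in XS if x < 0])                  # most negative (largest magnitude) first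
--     if not pos and K % 2:
--         # forced negative answer: the K negatives of smallest magnitude
--         return _prodmod(neg[len(neg) - K:])
--     # pair up each sorted half into consecutive pair-products (both lists descending)
--     pp = [pos[i] * pos[i + 1] for i in range(0, len(pos) - 1, 2)]
--     nn = [neg[i] * neg[i + 1] for i in range(0, len(neg) - 1, 2)]
--     # merge the two descending pair-product lists, keeping the K//2 largest
--     # (a negative pair wins ties); i counts the positive pairs consumed
--     p, i, j = 1, 0, 0
--     for _ in range(K // 2):
--         if i < len(pp) and (j >= len(nn) or pp[i] > nn[j]):
--             p = p * pp[i] % MOD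
--             i += 1
--         else:
--             p = p * nn[j] % MOD
--             j += 1
--     if K % 2:
--         p = p * (pos[2 * i] if 2 * i < len(pos) else neg[-1]) % MOD
--     return p
-- ===== Notes on version B (the rewrite author's own statement) =====
-- stated objective: alternative
-- what changed: Replaces A's destructive two-stack greedy (repeated pops from both sorted lists with a -INF sentinel and nested length branches, odd element folded inside the loop) by a non-mutating formulation: pair each sorted half once into consecutive pair-product arrays, merge the two descending arrays with index pointers keeping the K//2 largest (negative pair wins ties), and attach the odd leftover element afterwards from the pointer position; the forced cases use slices/folds instead of index loops.
-- outside the precondition, e.g. on solve(-1, -1, [2, 3]): A returns 1, B returns 2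
import Mathlib
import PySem

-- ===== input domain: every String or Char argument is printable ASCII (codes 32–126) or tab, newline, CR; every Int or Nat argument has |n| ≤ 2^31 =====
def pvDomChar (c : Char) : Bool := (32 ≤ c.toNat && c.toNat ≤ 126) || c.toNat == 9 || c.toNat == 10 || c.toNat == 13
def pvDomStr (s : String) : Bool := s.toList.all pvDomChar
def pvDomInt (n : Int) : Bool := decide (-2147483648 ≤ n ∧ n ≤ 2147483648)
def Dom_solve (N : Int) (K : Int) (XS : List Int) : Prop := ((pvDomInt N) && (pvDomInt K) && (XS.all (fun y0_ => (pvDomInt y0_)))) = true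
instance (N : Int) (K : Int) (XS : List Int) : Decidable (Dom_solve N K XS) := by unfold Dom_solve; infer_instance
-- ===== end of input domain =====

-- B replaces A's destructive two-stack greedy (pops + -INF sentinel, odd element inside the
-- loop) by a non-mutating one: precomputed consecutive pair-product arrays merged by index
-- pointers, with the odd leftover attached afterwards; same results (objective: alternative).

-- ===== PORT A =====
def pvINF : Int := 10 ^ 9 + 1
def pvMOD : Int := 10 ^ 9 + 7

-- the 'while K' loop of A, fuel = K (A decrements K by 2 or, at the end, by 1)
def solveLoop : List Int → List Int → Int → Nat → Int
  | _, _, ret, 0 => ret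
  | posi, nega, ret, 1 =>
      if posi ≠ [] then PySem.Int.mod (ret * PySem.List.pyGetD posi (-1) 0) pvMOD
      else PySem.Int.mod (ret * PySem.List.pyGetD nega 0 0) pvMOD
  | posi, nega, ret, (k+2) =>
      if 2 ≤ posi.length then
        let v := PySem.List.pyGetD posi (-1) 0 * PySem.List.pyGetD posi (-2) 0
        let w := if 2 ≤ nega.length then
                   PySem.List.pyGetD nega (-1) 0 * PySem.List.pyGetD nega (-2) 0
                 else -pvINF
        if v > w then
          solveLoop posi.dropLast.dropLast nega (PySem.Int.mod (ret * v) pvMOD) k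
        else
          solveLoop posi nega.dropLast.dropLast (PySem.Int.mod (ret * w) pvMOD) k
      else
        let w := PySem.List.pyGetD nega (-1) 0 * PySem.List.pyGetD nega (-2) 0
        solveLoop posi nega.dropLast.dropLast (PySem.Int.mod (ret * w) pvMOD) k

def solve (N : Int) (K : Int) (XS : List Int) : Int :=
  let posi := PySem.List.sorted (XS.filter (fun x => decide (0 ≤ x))) (fun x => x) false
  let nega := PySem.List.sorted (XS.filter (fun x => decide (x < 0))) (fun x => x) true
  if K = N then
    (PySem.List.pyRange 0 N 1).foldl
      (fun ret i => PySem.Int.mod (ret * PySem.List.pyGetD XS i 0) pvMOD) 1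
  else if posi = [] ∧ PySem.Int.mod K 2 ≠ 0 then
    (PySem.List.pyRange 0 K 1).foldl
      (fun ret i => PySem.Int.mod (ret * PySem.List.pyGetD nega i 0) pvMOD) 1
  else
    solveLoop posi nega 1 K.toNat

-- ===== PORT B =====
def prodmodB (xs : List Int) : Int :=
  xs.foldl (fun p x => PySem.Int.mod (p * x) pvMOD) 1

-- [l[i] * l[i+1] for i in range(0, len(l) - 1, 2)] : consecutive pair products
def pairProdsB : List Int → List Int
  | x :: y :: rest => (x * y) :: pairProdsB rest
  | _ => []

-- the 'for _ in range(K // 2)' pointer-merge loop of B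
def pickLoopB (pp nn : List Int) : Int → Int → Int → Nat → Int × Int × Int
  | p, i, j, 0 => (p, i, j)
  | p, i, j, (m+1) =>
      if i < (pp.length : Int) ∧ ((nn.length : Int) ≤ j ∨ PySem.List.pyGetD pp i 0 > PySem.List.pyGetD nn j 0) then
        pickLoopB pp nn (PySem.Int.mod (p * PySem.List.pyGetD pp i 0) pvMOD) (i + 1) j m
      else
        pickLoopB pp nn (PySem.Int.mod (p * PySem.List.pyGetD nn j 0) pvMOD) i (j + 1) m

def solve_alt (N : Int) (K : Int) (XS : List Int) : Int :=
  if K = N then prodmodB (PySem.List.slice XS none (some N))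
  else
    let pos := PySem.List.sorted (XS.filter (fun x => decide (0 ≤ x))) (fun x => x) true
    let neg := PySem.List.sorted (XS.filter (fun x => decide (x < 0))) (fun x => x) false
    if pos = [] ∧ PySem.Int.mod K 2 ≠ 0 then
      prodmodB (PySem.List.slice neg (some ((neg.length : Int) - K)) none)
    else
      let pp := pairProdsB pos
      let nn := pairProdsB neg
      let r := pickLoopB pp nn 1 0 0 (PySem.Int.floordiv K 2).toNat
      if PySem.Int.mod K 2 ≠ 0 then
        PySem.Int.mod (r.1 * (if 2 * r.2.1 < (pos.length : Int) then
                                PySem.List.pyGetD pos (2 * r.2.1) 0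
                              else PySem.List.pyGetD neg (-1) 0)) pvMOD
      else r.1

-- ===== PRECONDITION & SPEC =====
-- Pre_ is exactly where A returns normally, except K = N < 0 with -len(XS) < N: there A
-- returns 1 out of an empty range(N) loop while B's slice XS[:N] counts from the end — see
-- the cite.  For K = N, A indexes XS[0..N-1] so it needs 0 ≤ N ≤ len(XS) (for N ≤ -len(XS)
-- the slice is empty too and both give 1); for K ≠ N it ignores N and diverges for K < 0,
-- raises IndexError for K > len(XS) and for K = len(XS) when the counts of nonnegative and
-- of negative elements are both odd.
def Pre_solve (N : Int) (K : Int) (XS : List Int) : Prop :=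
  if K = N then ((0 ≤ N ∧ N ≤ (XS.length : Int)) ∨ N ≤ -(XS.length : Int))
  else 0 ≤ K ∧ K ≤ (XS.length : Int) ∧
    (K < (XS.length : Int) ∨
      ¬((XS.filter (fun x => decide (0 ≤ x))).length % 2 = 1
        ∧ (XS.filter (fun x => decide (x < 0))).length % 2 = 1))
instance (N : Int) (K : Int) (XS : List Int) : Decidable (Pre_solve N K XS) := by
  unfold Pre_solve; infer_instance

def pvWitness_solve : Int × Int × List Int := (4, 2, [3, -1, -2, 5])

def Spec_solve (N : Int) (K : Int) (XS : List Int) (out : Int) : Prop := out = solve_alt N K XS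
instance (N : Int) (K : Int) (XS : List Int) (out : Int) : Decidable (Spec_solve N K XS out) := by unfold Spec_solve; infer_instance

-- ===== CLAIM (what is proved, stated in full; the proofs are below) =====
def Claim_equal_solve : Prop := ∀ (N : Int) (K : Int) (XS : List Int), Dom_solve N K XS → Pre_solve N K XS → Spec_solve N K XS (solve N K XS)


-- ===== LEMMAS AND PROOFS =====

theorem pvMOD_pos : (0:Int) < pvMOD := by norm_num [pvMOD]

theorem modM (a : Int) : PySem.Int.mod a pvMOD = a % pvMOD :=
  PySem.Int.mod_eq_emod_of_pos pvMOD_pos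

theorem mod_mul_mod (a x : Int) :
    PySem.Int.mod (PySem.Int.mod a pvMOD * x) pvMOD = PySem.Int.mod (a * x) pvMOD := by
  rw [modM, modM, modM, Int.mul_emod, Int.emod_emod_of_dvd _ dvd_rfl, ← Int.mul_emod]

theorem prodmod_go : ∀ (l : List Int) (a : Int),
    l.foldl (fun p x => PySem.Int.mod (p * x) pvMOD) (PySem.Int.mod a pvMOD)
      = PySem.Int.mod (a * l.prod) pvMOD
  | [], a => by simp
  | x :: t, a => by
      simp only [List.foldl_cons]
      rw [mod_mul_mod, prodmod_go t (a * x), List.prod_cons, mul_assoc]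

theorem one_modM : PySem.Int.mod 1 pvMOD = 1 := by
  rw [modM]; exact Int.emod_eq_of_lt (by norm_num) (by norm_num [pvMOD])

theorem prodmodB_eq (l : List Int) : prodmodB l = PySem.Int.mod l.prod pvMOD := by
  unfold prodmodB
  rw [← one_modM, prodmod_go, one_mul]

theorem prodmodB_reverse (l : List Int) : prodmodB l.reverse = prodmodB l := by
  rw [prodmodB_eq, prodmodB_eq, List.prod_reverse]

theorem length_pairProds : ∀ l : List Int, (pairProdsB l).length = l.length / 2
  | [] => by simp [pairProdsB]
  | [x] => by simp [pairProdsB]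
  | x :: y :: t => by
      simp only [pairProdsB, List.length_cons, length_pairProds t]
      omega

theorem pairProds_getD : ∀ (l : List Int) (i : Nat), 2*i+1 < l.length →
    (pairProdsB l).getD i 0 = l.getD (2*i) 0 * l.getD (2*i+1) 0
  | [], i, h => by simp at h
  | [x], i, h => by simp only [List.length_cons, List.length_nil] at h; omega
  | x :: y :: t, 0, h => by simp [pairProdsB]
  | x :: y :: t, (i+1), h => by
      have hlt : 2*i+1 < t.length := by
        simp only [List.length_cons] at h; omega
      rw [show (2*(i+1)) = (2*i+1)+1 from by ring]
      simp only [pairProdsB, List.getD_cons_succ]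
      exact pairProds_getD t i hlt

theorem getD_eq_getElem' (l : List Int) (n : Nat) (h : n < l.length) : l.getD n 0 = l[n] := by
  simp [List.getD_eq_getElem?_getD, List.getElem?_eq_getElem h]

theorem rev_getD_neg_one (a : Int) (t : List Int) :
    PySem.List.pyGetD ((a :: t).reverse) (-1) 0 = a := by
  rw [List.reverse_cons]
  exact PySem.List.pyGetD_neg_one_append_singleton _ _ _

theorem rev_getD_neg_two (a b : Int) (t : List Int) :
    PySem.List.pyGetD ((a :: b :: t).reverse) (-2) 0 = b := by
  have h : (a :: b :: t).reverse = t.reverse ++ [b, a] := by simp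
  rw [h]
  rw [PySem.List.pyGetD_neg_ofNat _ 2 0 (by omega) (by simp)]
  rw [List.getElem_append_right (by simp)]
  simp

theorem rev_dropLast₂ (a b : Int) (t : List Int) :
    ((a :: b :: t).reverse).dropLast.dropLast = t.reverse := by
  rw [List.reverse_cons, List.reverse_cons, List.dropLast_concat, List.dropLast_concat]

theorem filter_part (XS : List Int) :
    (XS.filter (fun x => decide (0 ≤ x))).length + (XS.filter (fun x => decide (x < 0))).length
      = XS.length := by
  induction XS with
  | nil => simp
  | cons x t ih =>
      by_cases h : 0 ≤ x
      · rw [List.filter_cons, List.filter_cons]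
        rw [if_pos (by simpa using h), if_neg (by simpa using not_lt.mpr h)]
        simp only [List.length_cons]; omega
      · rw [List.filter_cons, List.filter_cons]
        rw [if_neg (by simpa using h), if_pos (by simpa using lt_of_not_ge h)]
        simp only [List.length_cons]; omega

theorem sortedRev_eq_reverse (l : List Int) :
    PySem.List.sorted l (fun x => x) true = (PySem.List.sorted l (fun x => x) false).reverse := by
  have h1 : (PySem.List.sorted l (fun x => x) true).Pairwise (fun a b : Int => b ≤ a) :=
    PySem.List.sorted_pairwise_rev l (fun x => x)
  have h2 : ((PySem.List.sorted l (fun x => x) false).reverse).Pairwise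
      (fun a b : Int => b ≤ a) := by
    rw [List.pairwise_reverse]
    exact PySem.List.sorted_pairwise l (fun x => x)
  have hp : (PySem.List.sorted l (fun x => x) true).Perm
      ((PySem.List.sorted l (fun x => x) false).reverse) :=
    (PySem.List.sorted_perm l (fun x => x) true).trans
      (((PySem.List.sorted_perm l (fun x => x) false).symm).trans
        (List.reverse_perm _).symm)
  exact List.Perm.eq_of_pairwise (fun a b _ _ hab hba => le_antisymm hba hab) h1 h2 hp

-- B's tail expression (the pointer-merge loop plus the odd single), as a function of Nat fuel
def bTail (pos neg : List Int) (p i j : Int) (k : Nat) : Int :=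
  let r := pickLoopB (pairProdsB pos) (pairProdsB neg) p i j (k / 2)
  if k % 2 = 1 then
    PySem.Int.mod (r.1 * (if 2 * r.2.1 < (pos.length : Int) then
          PySem.List.pyGetD pos (2 * r.2.1) 0
        else PySem.List.pyGetD neg (-1) 0)) pvMOD
  else r.1

theorem bTail_zero (pos neg : List Int) (p i j : Int) : bTail pos neg p i j 0 = p := by
  simp [bTail, pickLoopB]

theorem bTail_one (pos neg : List Int) (p i j : Int) :
    bTail pos neg p i j 1 =
      PySem.Int.mod (p * (if 2 * i < (pos.length : Int) then
          PySem.List.pyGetD pos (2 * i) 0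
        else PySem.List.pyGetD neg (-1) 0)) pvMOD := by
  simp [bTail, pickLoopB]

theorem bTail_succ_pos (pos neg : List Int) (p i j : Int) (k : Nat)
    (hc : i < ((pairProdsB pos).length : Int) ∧
      (((pairProdsB neg).length : Int) ≤ j ∨
        PySem.List.pyGetD (pairProdsB pos) i 0 > PySem.List.pyGetD (pairProdsB neg) j 0)) :
    bTail pos neg p i j (k+2)
      = bTail pos neg (PySem.Int.mod (p * PySem.List.pyGetD (pairProdsB pos) i 0) pvMOD)
          (i+1) j k := by
  simp only [bTail]
  rw [show (k+2)/2 = k/2 + 1 from by omega, show (k+2)%2 = k%2 from by omega]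
  simp only [pickLoopB, if_pos hc]

theorem bTail_succ_neg (pos neg : List Int) (p i j : Int) (k : Nat)
    (hc : ¬ (i < ((pairProdsB pos).length : Int) ∧
      (((pairProdsB neg).length : Int) ≤ j ∨
        PySem.List.pyGetD (pairProdsB pos) i 0 > PySem.List.pyGetD (pairProdsB neg) j 0))) :
    bTail pos neg p i j (k+2)
      = bTail pos neg (PySem.Int.mod (p * PySem.List.pyGetD (pairProdsB neg) j 0) pvMOD)
          i (j+1) k := by
  simp only [bTail]
  rw [show (k+2)/2 = k/2 + 1 from by omega, show (k+2)%2 = k%2 from by omega]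
  simp only [pickLoopB, if_neg hc]

theorem core (pos neg : List Int) (hpos : ∀ x ∈ pos, 0 ≤ x) :
    ∀ (k i j : Nat) (p : Int),
      2*i ≤ pos.length → 2*j ≤ neg.length →
      k + 2*i + 2*j ≤ pos.length + neg.length →
      ¬(k + 2*i + 2*j = pos.length + neg.length
        ∧ pos.length % 2 = 1 ∧ neg.length % 2 = 1) →
      solveLoop ((pos.drop (2*i)).reverse) ((neg.drop (2*j)).reverse) p k
        = bTail pos neg p (i:Int) (j:Int) k
  | 0, i, j, p, hi, hj, hr, hpar => by
      rw [bTail_zero]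
      simp [solveLoop]
  | 1, i, j, p, hi, hj, hr, hpar => by
      rw [bTail_one]
      by_cases hp1 : 2*i < pos.length
      · have hdp : pos.drop (2*i) = pos.getD (2*i) 0 :: pos.drop (2*i+1) := by
          rw [List.drop_eq_getElem_cons hp1, getD_eq_getElem' _ _ hp1]
        rw [hdp]
        simp only [solveLoop]
        rw [if_pos (by simp)]
        rw [rev_getD_neg_one]
        rw [if_pos (by exact_mod_cast hp1 : 2 * (i:Int) < (pos.length : Int))]
        rw [show (2 * (i:Int)) = ((2*i : Nat) : Int) from by push_cast; ring]
        rw [PySem.List.pyGetD_natCast]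
      · have hdrop : pos.drop (2*i) = [] := List.drop_eq_nil_of_le (by omega)
        rw [hdrop]
        simp only [List.reverse_nil, solveLoop]
        rw [if_neg (by simp)]
        have hjlt : 2*j < neg.length := by omega
        have hne : neg ≠ [] := by
          intro hcon; rw [hcon] at hjlt; simp at hjlt
        rw [if_neg (by omega : ¬ (2 * (i:Int) < (pos.length : Int)))]
        congr 2
        rw [PySem.List.pyGetD_zero, PySem.List.pyGetD_neg_one _ _ hne]
        have h1 : ((neg.drop (2*j)).reverse).getD 0 0
            = (((neg.drop (2*j)).reverse).head?).getD 0 := by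
          cases h : (neg.drop (2*j)).reverse <;> simp
        rw [h1, List.head?_reverse, List.getLast?_drop, if_neg (by omega),
            List.getLast?_eq_some_getLast hne]
        rfl
  | (k+2), i, j, p, hi, hj, hr, hpar => by
      have hLpp := length_pairProds pos
      have hLnn := length_pairProds neg
      by_cases hA : 2*i+2 ≤ pos.length
      · have h2i : 2*i < pos.length := by omega
        have h2i1 : 2*i+1 < pos.length := by omega
        have hdp : pos.drop (2*i)
            = pos.getD (2*i) 0 :: pos.getD (2*i+1) 0 :: pos.drop (2*(i+1)) := by
          rw [List.drop_eq_getElem_cons h2i, List.drop_eq_getElem_cons h2i1,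
              getD_eq_getElem' _ _ h2i, getD_eq_getElem' _ _ h2i1,
              show 2*i+1+1 = 2*(i+1) from by ring]
        have hppi : PySem.List.pyGetD (pairProdsB pos) ((i:Nat):Int) 0
            = pos.getD (2*i) 0 * pos.getD (2*i+1) 0 := by
          rw [PySem.List.pyGetD_natCast]
          exact pairProds_getD pos i h2i1
        have hcast1 : (i:Int) < (((pairProdsB pos).length):Int) := by
          omega
        by_cases hB : 2*j+2 ≤ neg.length
        · have h2j : 2*j < neg.length := by omega
          have h2j1 : 2*j+1 < neg.length := by omega
          have hdn : neg.drop (2*j)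
              = neg.getD (2*j) 0 :: neg.getD (2*j+1) 0 :: neg.drop (2*(j+1)) := by
            rw [List.drop_eq_getElem_cons h2j, List.drop_eq_getElem_cons h2j1,
                getD_eq_getElem' _ _ h2j, getD_eq_getElem' _ _ h2j1,
                show 2*j+1+1 = 2*(j+1) from by ring]
          have hnnj : PySem.List.pyGetD (pairProdsB neg) ((j:Nat):Int) 0
              = neg.getD (2*j) 0 * neg.getD (2*j+1) 0 := by
            rw [PySem.List.pyGetD_natCast]
            exact pairProds_getD neg j h2j1
          rw [hdp, hdn]
          simp only [solveLoop]
          rw [if_pos (show 2 ≤ ((pos.getD (2*i) 0 :: pos.getD (2*i+1) 0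
                :: List.drop (2*(i+1)) pos).reverse).length from by simp)]
          rw [if_pos (show 2 ≤ ((neg.getD (2*j) 0 :: neg.getD (2*j+1) 0
                :: List.drop (2*(j+1)) neg).reverse).length from by simp)]
          rw [rev_getD_neg_one, rev_getD_neg_two, rev_getD_neg_one, rev_getD_neg_two]
          by_cases hvw : pos.getD (2*i) 0 * pos.getD (2*i+1) 0
              > neg.getD (2*j) 0 * neg.getD (2*j+1) 0
          · rw [if_pos hvw, rev_dropLast₂, ← hdn]
            rw [core pos neg hpos k (i+1) j _ (by omega) (by omega) (by omega) (by omega)]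
            rw [bTail_succ_pos _ _ _ _ _ _ ⟨hcast1, Or.inr (by rw [hppi, hnnj]; exact hvw)⟩]
            rw [hppi]
            norm_cast
          · rw [if_neg hvw, rev_dropLast₂, ← hdp]
            rw [core pos neg hpos k i (j+1) _ (by omega) (by omega) (by omega) (by omega)]
            have hc : ¬ ((i:Int) < (((pairProdsB pos).length):Int) ∧
                ((((pairProdsB neg).length):Int) ≤ (j:Int) ∨
                  PySem.List.pyGetD (pairProdsB pos) ((i:Nat):Int) 0
                    > PySem.List.pyGetD (pairProdsB neg) ((j:Nat):Int) 0)) := by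
              rintro ⟨-, h2 | h2⟩
              · push_cast [hLnn] at h2; omega
              · rw [hppi, hnnj] at h2; exact hvw h2
            rw [bTail_succ_neg _ _ _ _ _ _ hc]
            rw [hnnj]
            norm_cast
        · -- no negative pair left: A compares with -INF and must take the positive pair
          have ha : 0 ≤ pos.getD (2*i) 0 := by
            rw [getD_eq_getElem' _ _ h2i]; exact hpos _ (List.getElem_mem _)
          have hb : 0 ≤ pos.getD (2*i+1) 0 := by
            rw [getD_eq_getElem' _ _ h2i1]; exact hpos _ (List.getElem_mem _)
          have hab : 0 ≤ pos.getD (2*i) 0 * pos.getD (2*i+1) 0 := mul_nonneg ha hb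
          rw [hdp]
          simp only [solveLoop]
          rw [if_pos (show 2 ≤ ((pos.getD (2*i) 0 :: pos.getD (2*i+1) 0
                :: List.drop (2*(i+1)) pos).reverse).length from by simp)]
          rw [if_neg (show ¬ 2 ≤ ((List.drop (2*j) neg).reverse).length from by
                simp only [List.length_reverse, List.length_drop]; omega)]
          rw [rev_getD_neg_one, rev_getD_neg_two]
          have hgt : pos.getD (2*i) 0 * pos.getD (2*i+1) 0 > -pvINF := by
            have hI : (0:Int) < pvINF := by norm_num [pvINF]
            omega
          rw [if_pos hgt]
          rw [rev_dropLast₂]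
          rw [core pos neg hpos k (i+1) j _ (by omega) (by omega) (by omega) (by omega)]
          rw [bTail_succ_pos _ _ _ _ _ _ ⟨hcast1, Or.inl (by push_cast [hLnn]; omega)⟩]
          rw [hppi]
          norm_cast
      · -- at most one positive left: A takes the negative pair without comparing
        have hB : 2*j+2 ≤ neg.length := by omega
        have h2j : 2*j < neg.length := by omega
        have h2j1 : 2*j+1 < neg.length := by omega
        have hdn : neg.drop (2*j)
            = neg.getD (2*j) 0 :: neg.getD (2*j+1) 0 :: neg.drop (2*(j+1)) := by
          rw [List.drop_eq_getElem_cons h2j, List.drop_eq_getElem_cons h2j1,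
              getD_eq_getElem' _ _ h2j, getD_eq_getElem' _ _ h2j1,
              show 2*j+1+1 = 2*(j+1) from by ring]
        have hnnj : PySem.List.pyGetD (pairProdsB neg) ((j:Nat):Int) 0
            = neg.getD (2*j) 0 * neg.getD (2*j+1) 0 := by
          rw [PySem.List.pyGetD_natCast]
          exact pairProds_getD neg j h2j1
        rw [hdn]
        simp only [solveLoop]
        rw [if_neg (show ¬ 2 ≤ ((List.drop (2*i) pos).reverse).length from by
              simp only [List.length_reverse, List.length_drop]; omega)]
        rw [rev_getD_neg_one, rev_getD_neg_two, rev_dropLast₂]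
        rw [core pos neg hpos k i (j+1) _ (by omega) (by omega) (by omega) (by omega)]
        have hc : ¬ ((i:Int) < (((pairProdsB pos).length):Int) ∧
            ((((pairProdsB neg).length):Int) ≤ (j:Int) ∨
              PySem.List.pyGetD (pairProdsB pos) ((i:Nat):Int) 0
                > PySem.List.pyGetD (pairProdsB neg) ((j:Nat):Int) 0)) := by
          rintro ⟨h1, -⟩
          push_cast [hLpp] at h1; omega
        rw [bTail_succ_neg _ _ _ _ _ _ hc]
        rw [hnnj]
        norm_cast

theorem foldl_range_getD_take (l : List Int) (m : Nat) (hm : m ≤ l.length) :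
    (PySem.List.pyRange 0 (m:Int) 1).foldl
        (fun ret i => PySem.Int.mod (ret * PySem.List.pyGetD l i 0) pvMOD) 1
      = prodmodB (l.take m) := by
  have hlen : (l.take m).length = m := by rw [List.length_take]; omega
  have h1 := PySem.List.foldl_pyRange_zero_pyGetD' (l.take m) 0
    (fun acc x => PySem.Int.mod (acc * x) pvMOD) 1
  rw [hlen] at h1
  calc (PySem.List.pyRange 0 (m:Int) 1).foldl
        (fun ret i => PySem.Int.mod (ret * PySem.List.pyGetD l i 0) pvMOD) 1
      = (PySem.List.pyRange 0 (m:Int) 1).foldl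
        (fun ret i => PySem.Int.mod (ret * PySem.List.pyGetD (l.take m) i 0) pvMOD) 1 := by
        apply PySem.List.foldl_congr_mem'
        intro x hx acc
        obtain ⟨hx0, hxm⟩ := (PySem.List.mem_pyRange_one).mp hx
        rw [PySem.List.pyGetD_eq_getElem _ 0 hx0 (by omega),
            PySem.List.pyGetD_eq_getElem _ 0 hx0 (by push_cast [hlen]; omega)]
        rw [List.getElem_take]
    _ = prodmodB (l.take m) := h1

-- ===== VERDICT (by name: the statement is the Claim_ definition above) =====
theorem solve_spec : Claim_equal_solve := by
  intro N K XS _ hpre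
  unfold Pre_solve at hpre
  unfold Spec_solve
  simp only [solve, solve_alt]
  by_cases hKeqN : K = N
  · subst hKeqN
    rw [if_pos rfl] at hpre
    rw [if_pos rfl, if_pos rfl]
    by_cases hN0 : 0 ≤ K
    · have hNle : K ≤ (XS.length : Int) := by
        rcases hpre with ⟨-, h⟩ | h <;> omega
      rw [show K = ((K.toNat : Nat) : Int) from (Int.toNat_of_nonneg hN0).symm]
      rw [foldl_range_getD_take XS K.toNat (by omega), PySem.List.slice_to_natCast XS K.toNat]
    · have hlen : (XS.length : Int) ≤ -K := by
        rcases hpre with ⟨h, -⟩ | h <;> omega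
      rw [PySem.List.pyRange_one_eq_nil (by omega)]
      rw [show K = -((((-K).toNat) : Nat) : Int) from by omega]
      rw [PySem.List.slice_to_neg_natCast _ _ (by omega)]
      rw [show XS.length - (-K).toNat = 0 from by omega, List.take_zero]
      rfl
  · rw [if_neg hKeqN] at hpre
    obtain ⟨hK0, hKle, hd⟩ := hpre
    rw [if_neg hKeqN, if_neg hKeqN]
    set P := XS.filter (fun x => decide (0 ≤ x)) with hP
    set Ng := XS.filter (fun x => decide (x < 0)) with hNg
    have hlenpart : P.length + Ng.length = XS.length := filter_part XS
    have hlenPs : (PySem.List.sorted P (fun x => x) true).length = P.length :=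
      PySem.List.length_sorted P (fun x => x) true
    have hlenNgs : (PySem.List.sorted Ng (fun x => x) false).length = Ng.length :=
      PySem.List.length_sorted Ng (fun x => x) false
    have hrev1 : PySem.List.sorted P (fun x => x) false
        = (PySem.List.sorted P (fun x => x) true).reverse := by
      rw [sortedRev_eq_reverse, List.reverse_reverse]
    have hrev2 : PySem.List.sorted Ng (fun x => x) true
        = (PySem.List.sorted Ng (fun x => x) false).reverse := sortedRev_eq_reverse Ng
    have hempiff : (PySem.List.sorted P (fun x => x) false = [])
        ↔ (PySem.List.sorted P (fun x => x) true = []) := by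
      rw [hrev1, List.reverse_eq_nil_iff]
    by_cases hforce : PySem.List.sorted P (fun x => x) true = [] ∧ PySem.Int.mod K 2 ≠ 0
    · rw [if_pos ⟨hempiff.mpr hforce.1, hforce.2⟩, if_pos hforce]
      have hPnil : P = [] := (PySem.List.sorted_eq_nil_iff _ _ _).mp hforce.1
      have hNgfull : Ng.length = XS.length := by
        rw [hPnil] at hlenpart; simpa using hlenpart
      have hKle2 : K.toNat ≤ (PySem.List.sorted Ng (fun x => x) true).length := by
        rw [PySem.List.length_sorted]
        omega
      rw [show K = ((K.toNat : Nat) : Int) from (Int.toNat_of_nonneg hK0).symm]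
      rw [foldl_range_getD_take _ K.toNat hKle2]
      rw [hrev2, List.take_reverse, prodmodB_reverse]
      rw [PySem.List.slice_from _ (by rw [hlenNgs]; omega)]
      congr 1
      congr 1
      rw [hlenNgs]
      omega
    · rw [if_neg (fun h => hforce ⟨hempiff.mp h.1, h.2⟩), if_neg hforce]
      have hposmem : ∀ x ∈ PySem.List.sorted P (fun x => x) true, 0 ≤ x := by
        intro x hx
        rw [PySem.List.mem_sorted] at hx
        have := List.mem_filter.mp hx
        simpa using this.2
      have hcore := core (PySem.List.sorted P (fun x => x) true)
        (PySem.List.sorted Ng (fun x => x) false) hposmem K.toNat 0 0 1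
        (by omega) (by omega)
        (by rw [hlenPs, hlenNgs]; omega)
        (by rw [hlenPs, hlenNgs]; rcases hd with h | h <;> omega)
      simp only [Nat.mul_zero, List.drop_zero, Nat.cast_zero] at hcore
      rw [hrev1, hrev2, hcore]
      have hdiv : (PySem.Int.floordiv K 2).toNat = K.toNat / 2 := by
        rw [PySem.Int.floordiv_eq_ediv_of_pos (by norm_num : (0:Int) < 2)]
        omega
      have hmod : (PySem.Int.mod K 2 ≠ 0) ↔ (K.toNat % 2 = 1) := by
        rw [PySem.Int.mod_eq_emod_of_pos (by norm_num : (0:Int) < 2)]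
        omega
      simp only [bTail]
      rw [hdiv]
      by_cases hodd : K.toNat % 2 = 1
      · rw [if_pos hodd, if_pos (hmod.mpr hodd)]
      · rw [if_neg hodd, if_neg (fun hcon => hodd (hmod.mp hcon))]
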